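-- pv_equiv track=rewrite | github.com/Harim-Yoo/consistency | 251019_coding_trial2.py | triple
-- ===== SOURCE A (Python) =====
-- def triple(nums):
--     res = []
--     def dfs(path):
--         if len(path)==3:
--             res.append(path.copy())
--             return None
--         for val in nums:
--             if val not in path:
--               path.append(val)
--               dfs(path)
--               path.pop()
--     dfs([])
--     return res
-- ===== SOURCE B (Python) =====
-- def triple(nums):
--     return [[a, b, c]
--             for a in nums
--             for b in nums if b != a
--             for c in nums if c != a and c != b]
-- ===== Notes on version B (the rewrite author's own statement) =====
-- stated objective: simpler
-- what changed: Replaces the mutable-state backtracking DFS (shared res, append/pop on path) with a single flat triple comprehension over nums filtering pairwise-distinct values.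
import Mathlib
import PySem

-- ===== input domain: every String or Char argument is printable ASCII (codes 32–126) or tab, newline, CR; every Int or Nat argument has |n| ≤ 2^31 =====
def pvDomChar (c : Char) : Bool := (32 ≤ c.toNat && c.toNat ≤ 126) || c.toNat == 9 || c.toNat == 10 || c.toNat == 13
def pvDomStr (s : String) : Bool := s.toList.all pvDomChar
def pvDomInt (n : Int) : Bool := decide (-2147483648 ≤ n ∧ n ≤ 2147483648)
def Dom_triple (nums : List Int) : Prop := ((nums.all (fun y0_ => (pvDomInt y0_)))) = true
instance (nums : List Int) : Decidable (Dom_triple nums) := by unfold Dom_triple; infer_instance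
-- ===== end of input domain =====

-- B replaces A's mutable-state backtracking DFS with a single flat triple comprehension (simpler).


-- ===== PORT A =====
-- dfs(path): the shared mutable `res` is modelled by returning the list of triples this call
-- appends, concatenated in loop order; `path.append/pop` backtracking becomes passing `path ++ [val]`.
-- The fuel argument only makes the recursion total (path grows by 1 each call, fuel 4 from []).
def tripleDfs (nums : List Int) : Nat → List Int → List (List Int)
  | 0, _ => []
  | fuel + 1, path =>
    if path.length = 3 then [path]
    else nums.foldl (fun res val =>
      if val ∈ path then res else res ++ tripleDfs nums fuel (path ++ [val])) []

def triple (nums : List Int) : List (List Int) := tripleDfs nums 4 []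

-- ===== PORT B =====
def triple_alt (nums : List Int) : List (List Int) :=
  nums.flatMap (fun a =>
    (nums.filter (fun b => b ≠ a)).flatMap (fun b =>
      (nums.filter (fun c => c ≠ a ∧ c ≠ b)).map (fun c => [a, b, c])))

-- ===== PRECONDITION & SPEC =====
def Spec_triple (nums : List Int) (out : List (List Int)) : Prop := out = triple_alt nums
instance (nums : List Int) (out : List (List Int)) : Decidable (Spec_triple nums out) := by unfold Spec_triple; infer_instance

-- ===== CLAIM (what is proved, stated in full; the proofs are below) =====
def Claim_equal_triple : Prop := ∀ (nums : List Int), Dom_triple nums → Spec_triple nums (triple nums)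

-- ===== LEMMAS AND PROOFS =====

-- A's loop accumulator (append-to-res) is a flatMap over nums.
theorem foldl_append_flatMap (f : Int → List (List Int)) (l : List Int) (init : List (List Int)) :
    l.foldl (fun res val => res ++ f val) init = init ++ l.flatMap f := by
  induction l generalizing init with
  | nil => simp
  | cons x xs ih => simp [List.foldl, ih, List.append_assoc]

theorem dfs_step (nums : List Int) (fuel : Nat) (path : List Int) (h : path.length ≠ 3) :
    tripleDfs nums (fuel + 1) path
      = nums.flatMap (fun val => if val ∈ path then [] else tripleDfs nums fuel (path ++ [val])) := by
  simp only [tripleDfs, if_neg h]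
  have : (fun (res : List (List Int)) (val : Int) =>
      if val ∈ path then res else res ++ tripleDfs nums fuel (path ++ [val]))
      = (fun res val => res ++ if val ∈ path then [] else tripleDfs nums fuel (path ++ [val])) := by
    funext res val; split <;> simp
  rw [this, foldl_append_flatMap]
  simp

-- flatMap with an if-skip equals flatMap over the filtered list.
theorem flatMap_if_filter (l : List Int) (p : Int → Prop) [DecidablePred p]
    (g : Int → List (List Int)) :
    l.flatMap (fun v => if p v then [] else g v)
      = (l.filter (fun v => ¬ p v)).flatMap g := by
  induction l with
  | nil => rfl
  | cons x xs ih =>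
    by_cases h : p x <;> simp [List.flatMap_cons, h, ih]

-- flatMap of singletons is map.
theorem flatMap_single (f : Int → List Int) (l : List Int) :
    l.flatMap (fun x => [f x]) = l.map f := by
  induction l with
  | nil => rfl
  | cons x xs ih => simp [List.flatMap_cons, ih]

-- ===== VERDICT (by name: the statement is the Claim_ definition above) =====
theorem triple_spec : Claim_equal_triple := by
  unfold Claim_equal_triple
  intro nums _
  unfold Spec_triple triple triple_alt
  rw [dfs_step nums 3 [] (by simp)]
  apply List.flatMap_congr
  intro a _
  simp only [List.not_mem_nil, if_false, List.nil_append]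
  rw [dfs_step nums 2 [a] (by simp)]
  rw [flatMap_if_filter nums (fun v => v ∈ [a])]
  have hfa : nums.filter (fun v => decide (v ∉ [a])) = nums.filter (fun b => decide (b ≠ a)) :=
    List.filter_congr (fun x _ => by simp)
  rw [hfa]
  apply List.flatMap_congr
  intro b _
  simp only [List.singleton_append]
  rw [dfs_step nums 1 [a, b] (by simp)]
  rw [flatMap_if_filter nums (fun v => v ∈ [a, b])]
  have hfb : nums.filter (fun v => decide (v ∉ [a, b])) = nums.filter (fun c => decide (c ≠ a ∧ c ≠ b)) :=
    List.filter_congr (fun x _ => by simp [not_or])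
  rw [hfb]
  have hleaf : ∀ c : Int, tripleDfs nums 1 ([a, b] ++ [c]) = [[a, b, c]] := by
    intro c; simp [tripleDfs]
  rw [List.flatMap_congr (fun c _ => hleaf c)]
  exact flatMap_single (fun c => [a, b, c]) _
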